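-- pv_equiv track=rewrite | github.com/GitMonsters/octotetrahedral-agi | arc-puzzle-catalog/re-arc/solves/08755df9/solver.py | transform
-- ===== SOURCE A (Python) =====
-- def transform(input_grid):
--     rows = len(input_grid)
--     cols = len(input_grid[0])
--
--     # Count magenta (6) cells — this is the scaling factor N
--     N = sum(1 for r in input_grid for c in r if c == 6)
--
--     # Count non-magenta (background) cells
--     total_bg = rows * cols - N
--
--     # Distribute bg cells across N meta-rows (right-aligned staircase)
--     base = total_bg // N
--     extra = total_bg % N
--
--     # Create output filled with magenta (6)
--     out_rows = rows * N
--     out_cols = cols * N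
--     output = [[6] * out_cols for _ in range(out_rows)]
--
--     # Place input copies in the meta-grid
--     for meta_r in range(N):
--         width = base + (1 if meta_r >= N - extra else 0)
--         for w in range(width):
--             meta_c = N - width + w
--             # Copy input into block (meta_r, meta_c)
--             for r in range(rows):
--                 for c in range(cols):
--                     output[meta_r * rows + r][meta_c * cols + c] = input_grid[r][c]
--
--     return output
-- ===== SOURCE B (Python) =====
-- def transform(input_grid):
--     rows = len(input_grid)
--     cols = len(input_grid[0])
--     N = sum(1 for r in input_grid for c in r if c == 6)
--     total_bg = rows * cols - N
--     base = total_bg // N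
--     extra = total_bg % N
--     return [
--         [input_grid[i % rows][j % cols]
--          if j // cols >= N - (base + (1 if i // rows >= N - extra else 0))
--          else 6
--          for j in range(cols * N)]
--         for i in range(rows * N)]
-- ===== Notes on version B (the rewrite author's own statement) =====
-- stated objective: simpler
-- what changed: Replaces A's two-phase mutation (preallocate an all-6 grid, then four nested loops overwrite selected blocks, with Python negative-index wraparound doing the work in degenerate wide cases) by a single per-cell comprehension that decides each output cell directly from i//rows and j//cols.
import Mathlib
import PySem

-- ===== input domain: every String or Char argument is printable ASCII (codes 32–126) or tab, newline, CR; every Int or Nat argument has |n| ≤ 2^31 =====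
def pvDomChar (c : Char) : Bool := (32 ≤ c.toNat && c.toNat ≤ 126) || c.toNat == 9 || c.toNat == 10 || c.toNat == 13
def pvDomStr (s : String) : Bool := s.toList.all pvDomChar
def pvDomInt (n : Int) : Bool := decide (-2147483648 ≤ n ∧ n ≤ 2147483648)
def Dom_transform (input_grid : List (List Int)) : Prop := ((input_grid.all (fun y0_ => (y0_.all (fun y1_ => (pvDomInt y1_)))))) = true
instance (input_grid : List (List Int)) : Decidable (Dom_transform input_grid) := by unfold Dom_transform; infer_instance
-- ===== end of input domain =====

-- B replaces A's fill-with-6-then-overwrite-blocks mutation by a single per-cell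
-- comprehension deciding each output cell from i//rows and j//cols (simpler, not faster).

-- ===== PORT A =====
-- shared prelude: both Pythons compute these same five lines (rows, cols, N, base, extra)
def tfRows (g : List (List Int)) : Int := (g.length : Int)
def tfCols (g : List (List Int)) : Int := ((PySem.List.pyGetD g 0 ([] : List Int)).length : Int)
def tfN (g : List (List Int)) : Int :=
  g.foldl (fun acc r => r.foldl (fun a c => if c == 6 then a + 1 else a) acc) 0
def tfBase (g : List (List Int)) : Int :=
  PySem.Int.floordiv (tfRows g * tfCols g - tfN g) (tfN g)
def tfExtra (g : List (List Int)) : Int :=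
  PySem.Int.mod (tfRows g * tfCols g - tfN g) (tfN g)
-- width = base + (1 if meta_r >= N - extra else 0)
def tfWidth (g : List (List Int)) (mr : Int) : Int :=
  tfBase g + (if tfN g - tfExtra g ≤ mr then 1 else 0)

-- output[i][j] = v : fetch row i, set item j in it, put the row back (Python index semantics)
def pyWriteCell (out : List (List Int)) (i j v : Int) : List (List Int) :=
  PySem.List.pySetD out i (PySem.List.pySetD (PySem.List.pyGetD out i []) j v)

def transform (input_grid : List (List Int)) : List (List Int) :=
  (PySem.List.pyRange 0 (tfN input_grid) 1).foldl (fun out meta_r =>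
    (PySem.List.pyRange 0 (tfWidth input_grid meta_r) 1).foldl (fun out w =>
      (PySem.List.pyRange 0 (tfRows input_grid) 1).foldl (fun out r =>
        (PySem.List.pyRange 0 (tfCols input_grid) 1).foldl (fun out c =>
          pyWriteCell out (meta_r * tfRows input_grid + r)
            ((tfN input_grid - tfWidth input_grid meta_r + w) * tfCols input_grid + c)
            (PySem.List.pyGetD (PySem.List.pyGetD input_grid r []) c 0)) out) out) out)
    (List.replicate (tfRows input_grid * tfN input_grid).toNat
      (List.replicate (tfCols input_grid * tfN input_grid).toNat (6 : Int)))

-- ===== PORT B =====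
def transform_alt (input_grid : List (List Int)) : List (List Int) :=
  (PySem.List.pyRange 0 (tfRows input_grid * tfN input_grid) 1).map (fun i =>
    (PySem.List.pyRange 0 (tfCols input_grid * tfN input_grid) 1).map (fun j =>
      if tfN input_grid - tfWidth input_grid (PySem.Int.floordiv i (tfRows input_grid))
           ≤ PySem.Int.floordiv j (tfCols input_grid) then
        PySem.List.pyGetD
          (PySem.List.pyGetD input_grid (PySem.Int.mod i (tfRows input_grid)) [])
          (PySem.Int.mod j (tfCols input_grid)) 0
      else 6))

-- ===== PRECONDITION & SPEC =====
-- number of magenta (6) cells, and the widest staircase step base+(1 if extra>0 else 0)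
def magentaN (g : List (List Int)) : Int := ((g.flatMap id).countP (fun c => c == 6) : Int)
def stairMaxW (g : List (List Int)) : Int :=
  PySem.Int.floordiv ((g.length : Int) * tfCols g - magentaN g) (magentaN g) +
    (if 1 ≤ PySem.Int.mod ((g.length : Int) * tfCols g - magentaN g) (magentaN g) then 1 else 0)

-- Pre_ excludes exactly the inputs where A raises: the empty grid (IndexError), grids with no 6
-- (ZeroDivisionError), grids with a row shorter than the first row (IndexError while copying),
-- and grids whose widest step exceeds 2N (IndexError: column index below -out_cols).
def Pre_transform (input_grid : List (List Int)) : Prop :=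
  input_grid ≠ [] ∧
  1 ≤ magentaN input_grid ∧
  (∀ r ∈ input_grid, tfCols input_grid ≤ (r.length : Int)) ∧
  (tfCols input_grid = 0 ∨ stairMaxW input_grid ≤ 2 * magentaN input_grid)
instance (input_grid : List (List Int)) : Decidable (Pre_transform input_grid) := by
  unfold Pre_transform; infer_instance
def pvWitness_transform : List (List Int) := [[6]]

def Spec_transform (input_grid : List (List Int)) (out : List (List Int)) : Prop :=
  out = transform_alt input_grid
instance (input_grid : List (List Int)) (out : List (List Int)) : Decidable (Spec_transform input_grid out) := by
  unfold Spec_transform; infer_instance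

-- ===== CLAIM (what is proved, stated in full; the proofs are below) =====
def Claim_equal_transform : Prop := ∀ (input_grid : List (List Int)), Dom_transform input_grid → Pre_transform input_grid → Spec_transform input_grid (transform input_grid)

-- ===== LEMMAS AND PROOFS =====

-- proof-side abbreviations
def tfR (g : List (List Int)) : Nat := (tfRows g * tfN g).toNat
def tfC (g : List (List Int)) : Nat := (tfCols g * tfN g).toNat
def cellOf (out : List (List Int)) (i j : Nat) : Int := (out.getD i []).getD j 0
def target (g : List (List Int)) (i j : Int) : Int :=
  PySem.List.pyGetD (PySem.List.pyGetD g (PySem.Int.mod i (tfRows g)) [])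
    (PySem.Int.mod j (tfCols g)) 0
def landRow (g : List (List Int)) (q : Int × Int × Int × Int) : Int :=
  q.1 * tfRows g + q.2.2.1
def rawCol (g : List (List Int)) (q : Int × Int × Int × Int) : Int :=
  (tfN g - tfWidth g q.1 + q.2.1) * tfCols g + q.2.2.2
def landCol (g : List (List Int)) (q : Int × Int × Int × Int) : Int :=
  if rawCol g q < 0 then rawCol g q + tfCols g * tfN g else rawCol g q
def ValidQ (g : List (List Int)) (q : Int × Int × Int × Int) : Prop :=
  0 ≤ q.1 ∧ q.1 < tfN g ∧ 0 ≤ q.2.1 ∧ q.2.1 < tfWidth g q.1 ∧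
  0 ≤ q.2.2.1 ∧ q.2.2.1 < tfRows g ∧ 0 ≤ q.2.2.2 ∧ q.2.2.2 < tfCols g
def stepQ (g : List (List Int)) (out : List (List Int)) (q : Int × Int × Int × Int) : List (List Int) :=
  pyWriteCell out (landRow g q) (rawCol g q)
    (PySem.List.pyGetD (PySem.List.pyGetD g q.2.2.1 []) q.2.2.2 0)
def quadList (g : List (List Int)) : List (Int × Int × Int × Int) :=
  (PySem.List.pyRange 0 (tfN g) 1).flatMap fun mr =>
    (PySem.List.pyRange 0 (tfWidth g mr) 1).flatMap fun w =>
      (PySem.List.pyRange 0 (tfRows g) 1).flatMap fun r =>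
        (PySem.List.pyRange 0 (tfCols g) 1).map fun c => (mr, w, r, c)

-- A's nested loops are the flat fold over all (meta_r, w, r, c) quadruples
lemma transform_eq_fold (g : List (List Int)) :
    transform g = (quadList g).foldl (stepQ g)
      (List.replicate (tfR g) (List.replicate (tfC g) (6 : Int))) := by
  unfold transform quadList tfR tfC
  simp only [List.foldl_flatMap, List.foldl_map, stepQ, landRow, rawCol, pyWriteCell]

-- counting via the nested foldl equals countP on the flattened grid
lemma tfN_eq_magentaN (g : List (List Int)) : tfN g = magentaN g := by
  unfold tfN magentaN
  have := (List.foldl_flatMap (f := (id : List Int → List Int))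
    (g := fun a (c : Int) => if c == 6 then a + 1 else a) (l := g) (init := (0 : Int))).symm
  simp only [id] at this
  rw [this, PySem.List.foldl_count_if (fun c => c == 6) (g.flatMap id) 0]
  simp

lemma stairMaxW_eq (g : List (List Int)) :
    stairMaxW g = tfWidth g (tfN g - 1) := by
  unfold stairMaxW tfWidth tfBase tfExtra tfRows
  rw [← tfN_eq_magentaN]
  congr 1
  split_ifs <;> omega

lemma tfWidth_le_max (g : List (List Int)) {mr : Int} (hmr : mr ≤ tfN g - 1) :
    tfWidth g mr ≤ tfWidth g (tfN g - 1) := by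
  unfold tfWidth
  split_ifs <;> omega

-- Python row[j] = v for a negative in-range index
lemma pySetD_neg {α : Type} (xs : List α) {i : Int} (v : α)
    (h0 : i < 0) (h1 : -(xs.length : Int) ≤ i) :
    PySem.List.pySetD xs i v = xs.set (i + xs.length).toNat v := by
  unfold PySem.List.pySetD PySem.List.pySet? PySem.List.pyIdx?
  rw [if_neg (by omega), if_pos h1]
  simp only [Option.map_some, Option.getD_some]
  congr 1
  omega

lemma mem_quadList (g : List (List Int)) (q : Int × Int × Int × Int) :
    q ∈ quadList g ↔ ValidQ g q := by
  obtain ⟨mr, w, r, c⟩ := q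
  simp only [quadList, List.mem_flatMap, List.mem_map, PySem.List.mem_pyRange_one, ValidQ,
    Prod.mk.injEq]
  constructor
  · rintro ⟨a, ha, b, hb, d, hd, e, he, rfl, rfl, rfl, rfl⟩
    exact ⟨ha.1, ha.2, hb.1, hb.2, hd.1, hd.2, he.1, he.2⟩
  · rintro ⟨h1, h2, h3, h4, h5, h6, h7, h8⟩
    exact ⟨mr, ⟨h1, h2⟩, w, ⟨h3, h4⟩, r, ⟨h5, h6⟩, c, ⟨h7, h8⟩, rfl, rfl, rfl, rfl⟩

lemma getD_set_eq {α : Type} (l : List α) (i : Nat) (v d : α) (h : i < l.length) :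
    (l.set i v).getD i d = v := by
  rw [List.getD_eq_getElem?_getD, List.getElem?_set_self h]; rfl

lemma getD_set_ne {α : Type} (l : List α) {i j : Nat} (v d : α) (h : i ≠ j) :
    (l.set i v).getD j d = l.getD j d := by
  rw [List.getD_eq_getElem?_getD, List.getElem?_set_ne h, ← List.getD_eq_getElem?_getD]

lemma getD_eq_getElem' {α : Type} (l : List α) (i : Nat) (d : α) (h : i < l.length) :
    l.getD i d = l[i] := by
  rw [List.getD_eq_getElem?_getD, List.getElem?_eq_getElem h]; rfl

lemma int_mod_mul_add (a b r : Int) (hb : 0 < b) (h0 : 0 ≤ r) (h1 : r < b) :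
    PySem.Int.mod (a * b + r) b = r := by
  rw [PySem.Int.mod_eq_emod_of_pos hb]
  have h2 : a * b + r = r + b * a := by ring
  rw [h2, Int.add_mul_emod_self_left, Int.emod_eq_of_lt h0 h1]

lemma int_floordiv_mul_add (a b r : Int) (hb : 0 < b) (h0 : 0 ≤ r) (h1 : r < b) :
    PySem.Int.floordiv (a * b + r) b = a := by
  rw [PySem.Int.floordiv_eq_iff_of_pos hb]
  constructor <;> nlinarith

-- effect of a single write on shape and cells
lemma step_cells (g : List (List Int))
    (hW : 1 ≤ tfCols g → ∀ mr, 0 ≤ mr → mr < tfN g → tfWidth g mr ≤ 2 * tfN g)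
    (q : Int × Int × Int × Int) (hq : ValidQ g q) (out : List (List Int))
    (hlen : out.length = tfR g) (hrow : ∀ row ∈ out, row.length = tfC g) :
    (stepQ g out q).length = tfR g ∧ (∀ row ∈ stepQ g out q, row.length = tfC g) ∧
    ∀ i j : Nat, i < tfR g → j < tfC g →
      cellOf (stepQ g out q) i j =
        if landRow g q = (i : Int) ∧ landCol g q = (j : Int) then target g (i : Int) (j : Int)
        else cellOf out i j := by
  obtain ⟨mr, w, r, c⟩ := q
  simp only [ValidQ] at hq
  obtain ⟨hmr0, hmrN, hw0, hwW, hr0, hrR, hc0, hcC⟩ := hq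
  have hcols1 : (1 : Int) ≤ tfCols g := by omega
  have hN1 : (0 : Int) < tfN g := by omega
  have hrows1 : (0 : Int) < tfRows g := by omega
  have hwle : tfWidth g mr ≤ 2 * tfN g := hW hcols1 mr hmr0 hmrN
  have hRint : (tfR g : Int) = tfRows g * tfN g := by
    unfold tfR; rw [Int.toNat_of_nonneg (mul_nonneg (by positivity) hN1.le)]
  have hCint : (tfC g : Int) = tfCols g * tfN g := by
    unfold tfC; rw [Int.toNat_of_nonneg (mul_nonneg (by omega) hN1.le)]
  have hlandrow : landRow g (mr, w, r, c) = mr * tfRows g + r := rfl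
  have hrawdef : rawCol g (mr, w, r, c) = (tfN g - tfWidth g mr + w) * tfCols g + c := rfl
  have hland0 : 0 ≤ landRow g (mr, w, r, c) := by rw [hlandrow]; nlinarith
  have hlandR : landRow g (mr, w, r, c) < tfRows g * tfN g := by
    rw [hlandrow]
    have h1 : (mr + 1) * tfRows g ≤ tfN g * tfRows g :=
      mul_le_mul_of_nonneg_right (by omega) (by omega)
    nlinarith
  have hraw_lt : rawCol g (mr, w, r, c) < tfCols g * tfN g := by
    rw [hrawdef]
    have h1 : (tfN g - tfWidth g mr + w) * tfCols g ≤ (tfN g - 1) * tfCols g :=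
      mul_le_mul_of_nonneg_right (by omega) (by omega)
    nlinarith
  have hraw_ge : -(tfCols g * tfN g) ≤ rawCol g (mr, w, r, c) := by
    rw [hrawdef]
    have h1 : (-(tfN g)) * tfCols g ≤ (tfN g - tfWidth g mr + w) * tfCols g :=
      mul_le_mul_of_nonneg_right (by omega) (by omega)
    nlinarith
  have hlc0 : 0 ≤ landCol g (mr, w, r, c) := by
    unfold landCol; split <;> omega
  have hlcC : landCol g (mr, w, r, c) < tfCols g * tfN g := by
    unfold landCol; split <;> omega
  -- the write hits row index it, column index jt
  set It := (landRow g (mr, w, r, c)).toNat with hIt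
  set Jt := (landCol g (mr, w, r, c)).toNat with hJt
  have hItlt : It < out.length := by rw [hlen]; omega
  have hrowlen : out[It].length = tfC g := hrow _ (List.getElem_mem hItlt)
  have hget : PySem.List.pyGetD out (landRow g (mr, w, r, c)) [] = out[It] :=
    PySem.List.pyGetD_eq_getElem out [] hland0 (by rw [hlen]; exact_mod_cast by omega)
  have hsetrow : PySem.List.pySetD out[It] (rawCol g (mr, w, r, c))
      (PySem.List.pyGetD (PySem.List.pyGetD g r []) c 0) =
      out[It].set Jt (PySem.List.pyGetD (PySem.List.pyGetD g r []) c 0) := by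
    by_cases hneg : rawCol g (mr, w, r, c) < 0
    · rw [pySetD_neg _ _ hneg (by rw [hrowlen]; omega)]
      congr 1
      rw [hJt]
      unfold landCol
      rw [if_pos hneg, hrowlen]
      omega
    · rw [PySem.List.pySetD_of_nonneg _ _ (by omega)]
      congr 1
      rw [hJt]
      unfold landCol
      rw [if_neg hneg]
  have hstep : stepQ g out (mr, w, r, c) =
      out.set It (out[It].set Jt (PySem.List.pyGetD (PySem.List.pyGetD g r []) c 0)) := by
    unfold stepQ pyWriteCell
    rw [hget, hsetrow, PySem.List.pySetD_of_nonneg _ _ hland0]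
  have hJtlt : Jt < out[It].length := by rw [hrowlen]; omega
  refine ⟨by rw [hstep]; simp [hlen], ?_, ?_⟩
  · intro row hmem
    rw [hstep] at hmem
    rcases List.mem_or_eq_of_mem_set hmem with h | h
    · exact hrow row h
    · rw [h]; simp [hrowlen]
  · intro i j hi hj
    rw [hstep]
    unfold cellOf
    by_cases hieq : i = It
    · subst hieq
      rw [getD_set_eq _ _ _ _ hItlt]
      by_cases hjeq : j = Jt
      · subst hjeq
        rw [getD_set_eq _ _ _ _ hJtlt]
        have hlandi : landRow g (mr, w, r, c) = (It : Int) := by omega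
        have hlandj : landCol g (mr, w, r, c) = (Jt : Int) := by omega
        rw [if_pos ⟨hlandi, hlandj⟩]
        unfold target
        rw [← hlandi, ← hlandj, hlandrow,
          int_mod_mul_add mr (tfRows g) r hrows1 hr0 hrR]
        have hlc : landCol g (mr, w, r, c) =
            (if rawCol g (mr, w, r, c) < 0 then tfN g - tfWidth g mr + w + tfN g
             else tfN g - tfWidth g mr + w) * tfCols g + c := by
          unfold landCol
          split <;> rw [hrawdef] <;> ring
        rw [hlc, int_mod_mul_add _ (tfCols g) c (by omega) hc0 hcC]
      · rw [getD_set_ne _ _ _ (fun h => hjeq h.symm)]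
        rw [if_neg (by rintro ⟨-, hlj⟩; exact hjeq (by omega))]
        rw [getD_eq_getElem' _ _ _ hItlt]
    · rw [getD_set_ne _ _ _ (fun h => hieq h.symm)]
      rw [if_neg (by rintro ⟨hli, -⟩; exact hieq (by omega))]

-- invariant: the fold of writes paints exactly the touched cells with the target value
lemma fold_step_cells (g : List (List Int))
    (hW : 1 ≤ tfCols g → ∀ mr, 0 ≤ mr → mr < tfN g → tfWidth g mr ≤ 2 * tfN g) :
    ∀ (qs : List (Int × Int × Int × Int)), (∀ q ∈ qs, ValidQ g q) →
    ∀ (out : List (List Int)), out.length = tfR g → (∀ row ∈ out, row.length = tfC g) →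
      (qs.foldl (stepQ g) out).length = tfR g ∧
      (∀ row ∈ qs.foldl (stepQ g) out, row.length = tfC g) ∧
      ∀ i j : Nat, i < tfR g → j < tfC g →
        ((∃ q ∈ qs, landRow g q = (i : Int) ∧ landCol g q = (j : Int)) →
          cellOf (qs.foldl (stepQ g) out) i j = target g (i : Int) (j : Int)) ∧
        ((∀ q ∈ qs, ¬(landRow g q = (i : Int) ∧ landCol g q = (j : Int))) →
          cellOf (qs.foldl (stepQ g) out) i j = cellOf out i j) := by
  intro qs
  induction qs with
  | nil =>
    intro _ out hlen hrow
    refine ⟨hlen, hrow, fun i j hi hj => ⟨fun h => by simp at h, fun _ => rfl⟩⟩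
  | cons q qs ih =>
    intro hval out hlen hrow
    have hq : ValidQ g q := hval q (List.mem_cons_self ..)
    obtain ⟨hlen', hrow', hcell'⟩ := step_cells g hW q hq out hlen hrow
    obtain ⟨hlen2, hrow2, hcell2⟩ :=
      ih (fun p hp => hval p (List.mem_cons_of_mem _ hp)) (stepQ g out q) hlen' hrow'
    refine ⟨hlen2, hrow2, fun i j hi hj => ⟨?_, ?_⟩⟩
    · rintro ⟨p, hp, hland⟩
      rcases List.mem_cons.mp hp with rfl | hpmem
      · by_cases htail : ∃ p' ∈ qs, landRow g p' = (i : Int) ∧ landCol g p' = (j : Int)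
        · exact (hcell2 i j hi hj).1 htail
        · push_neg at htail
          have := (hcell2 i j hi hj).2 (fun p' hp' h' => htail p' hp' h'.1 h'.2)
          rw [List.foldl_cons, this, hcell' i j hi hj, if_pos hland]
      · exact (hcell2 i j hi hj).1 ⟨p, hpmem, hland⟩
    · intro hnone
      have := (hcell2 i j hi hj).2
        (fun p' hp' => hnone p' (List.mem_cons_of_mem _ hp'))
      rw [List.foldl_cons, this, hcell' i j hi hj,
        if_neg (hnone q (List.mem_cons_self ..))]

-- a cell is touched iff B's per-cell staircase condition holds
lemma exists_land_iff (g : List (List Int)) (h0N : 0 < tfN g) (h0r : 0 < tfRows g)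
    (hW : 1 ≤ tfCols g → ∀ mr, 0 ≤ mr → mr < tfN g → tfWidth g mr ≤ 2 * tfN g)
    (i j : Nat) (hi : i < tfR g) (hj : j < tfC g) :
    (∃ q ∈ quadList g, landRow g q = (i : Int) ∧ landCol g q = (j : Int)) ↔
      tfN g - tfWidth g (PySem.Int.floordiv (i : Int) (tfRows g))
        ≤ PySem.Int.floordiv (j : Int) (tfCols g) := by
  have hRint : (tfR g : Int) = tfRows g * tfN g := by
    unfold tfR; rw [Int.toNat_of_nonneg (mul_nonneg (by unfold tfRows; positivity) h0N.le)]
  have hCint : (tfC g : Int) = tfCols g * tfN g := by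
    unfold tfC
    rw [Int.toNat_of_nonneg (mul_nonneg (by unfold tfCols; positivity) h0N.le)]
  have hiI : (i : Int) < tfRows g * tfN g := by rw [← hRint]; exact_mod_cast hi
  have hjI : (j : Int) < tfCols g * tfN g := by rw [← hCint]; exact_mod_cast hj
  have hcge : 0 ≤ tfCols g := by unfold tfCols; positivity
  have hcols1 : 1 ≤ tfCols g := by
    by_contra hc
    have h0 : tfCols g = 0 := by omega
    rw [h0] at hjI
    omega
  constructor
  · rintro ⟨q, hqmem, hli, hlj⟩
    have hq := (mem_quadList g q).mp hqmem
    obtain ⟨mr, w, r, c⟩ := q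
    simp only [ValidQ] at hq
    obtain ⟨hmr0, hmrN, hw0, hwW, hr0, hrR, hc0, hcC⟩ := hq
    have hwle : tfWidth g mr ≤ 2 * tfN g := hW hcols1 mr hmr0 hmrN
    have hlandrow : landRow g (mr, w, r, c) = mr * tfRows g + r := rfl
    have hrawdef : rawCol g (mr, w, r, c) = (tfN g - tfWidth g mr + w) * tfCols g + c := rfl
    have hfi : PySem.Int.floordiv (i : Int) (tfRows g) = mr := by
      rw [← hli, hlandrow]; exact int_floordiv_mul_add mr (tfRows g) r h0r hr0 hrR
    rw [hfi]
    unfold landCol at hlj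
    split at hlj
    · have hj2 : (j : Int) = (tfN g - tfWidth g mr + w + tfN g) * tfCols g + c := by
        rw [← hlj, hrawdef]; ring
      have hfj : PySem.Int.floordiv (j : Int) (tfCols g) = tfN g - tfWidth g mr + w + tfN g := by
        rw [hj2]; exact int_floordiv_mul_add _ (tfCols g) c (by omega) hc0 hcC
      rw [hfj]; omega
    · have hfj : PySem.Int.floordiv (j : Int) (tfCols g) = tfN g - tfWidth g mr + w := by
        rw [← hlj, hrawdef]; exact int_floordiv_mul_add _ (tfCols g) c (by omega) hc0 hcC
      rw [hfj]; omega
  · intro hcond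
    have hmr0 : 0 ≤ PySem.Int.floordiv (i : Int) (tfRows g) := by
      rw [PySem.Int.floordiv_eq_ediv_of_pos h0r]
      exact Int.ediv_nonneg (by positivity) h0r.le
    have hmrN : PySem.Int.floordiv (i : Int) (tfRows g) < tfN g := by
      rw [PySem.Int.floordiv_lt_iff_lt_mul h0r]
      nlinarith
    have hr0 : 0 ≤ PySem.Int.mod (i : Int) (tfRows g) := PySem.Int.mod_nonneg _ h0r
    have hrR : PySem.Int.mod (i : Int) (tfRows g) < tfRows g := PySem.Int.mod_lt _ h0r
    have hc0p : 0 < tfCols g := by omega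
    have hmc0 : 0 ≤ PySem.Int.floordiv (j : Int) (tfCols g) := by
      rw [PySem.Int.floordiv_eq_ediv_of_pos hc0p]
      exact Int.ediv_nonneg (by positivity) hc0p.le
    have hmcN : PySem.Int.floordiv (j : Int) (tfCols g) < tfN g := by
      rw [PySem.Int.floordiv_lt_iff_lt_mul hc0p]
      nlinarith
    have hcc0 : 0 ≤ PySem.Int.mod (j : Int) (tfCols g) := PySem.Int.mod_nonneg _ hc0p
    have hccC : PySem.Int.mod (j : Int) (tfCols g) < tfCols g := PySem.Int.mod_lt _ hc0p
    refine ⟨(PySem.Int.floordiv (i : Int) (tfRows g),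
        PySem.Int.floordiv (j : Int) (tfCols g) -
          (tfN g - tfWidth g (PySem.Int.floordiv (i : Int) (tfRows g))),
        PySem.Int.mod (i : Int) (tfRows g), PySem.Int.mod (j : Int) (tfCols g)),
      (mem_quadList g _).mpr (by
        simp only [ValidQ]
        exact ⟨hmr0, hmrN, by omega, by omega, hr0, hrR, hcc0, hccC⟩), ?_, ?_⟩
    · show PySem.Int.floordiv (i : Int) (tfRows g) * tfRows g +
        PySem.Int.mod (i : Int) (tfRows g) = (i : Int)
      exact PySem.Int.floordiv_mul_add_mod _ _
    · have hraw : rawCol g (PySem.Int.floordiv (i : Int) (tfRows g),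
          PySem.Int.floordiv (j : Int) (tfCols g) -
            (tfN g - tfWidth g (PySem.Int.floordiv (i : Int) (tfRows g))),
          PySem.Int.mod (i : Int) (tfRows g), PySem.Int.mod (j : Int) (tfCols g)) = (j : Int) := by
        show (tfN g - tfWidth g (PySem.Int.floordiv (i : Int) (tfRows g)) +
            (PySem.Int.floordiv (j : Int) (tfCols g) -
              (tfN g - tfWidth g (PySem.Int.floordiv (i : Int) (tfRows g))))) * tfCols g +
            PySem.Int.mod (j : Int) (tfCols g) = (j : Int)
        have : tfN g - tfWidth g (PySem.Int.floordiv (i : Int) (tfRows g)) +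
            (PySem.Int.floordiv (j : Int) (tfCols g) -
              (tfN g - tfWidth g (PySem.Int.floordiv (i : Int) (tfRows g)))) =
            PySem.Int.floordiv (j : Int) (tfCols g) := by ring
        rw [this]
        exact PySem.Int.floordiv_mul_add_mod _ _
      unfold landCol
      rw [hraw, if_neg (by omega)]

-- ===== VERDICT (by name: the statement is the Claim_ definition above) =====
theorem transform_spec : Claim_equal_transform := by
  intro g _ hpre
  unfold Spec_transform
  obtain ⟨hne, hN1, hrowsge, hdisj⟩ := hpre
  have hNg : 0 < tfN g := by rw [tfN_eq_magentaN]; omega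
  have hrows : 0 < tfRows g := by
    unfold tfRows
    exact_mod_cast List.length_pos_iff.mpr hne
  have hW : 1 ≤ tfCols g → ∀ mr, 0 ≤ mr → mr < tfN g → tfWidth g mr ≤ 2 * tfN g := by
    intro hc mr h0 hlt
    rcases hdisj with h | h
    · omega
    · calc tfWidth g mr ≤ tfWidth g (tfN g - 1) := tfWidth_le_max g (by omega)
        _ = stairMaxW g := (stairMaxW_eq g).symm
        _ ≤ 2 * magentaN g := h
        _ = 2 * tfN g := by rw [← tfN_eq_magentaN]
  obtain ⟨hlen, hrowlen, hcell⟩ := fold_step_cells g hW (quadList g)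
    (fun q hq => (mem_quadList g q).mp hq)
    (List.replicate (tfR g) (List.replicate (tfC g) (6 : Int)))
    (by simp)
    (by intro row h; rw [List.eq_of_mem_replicate h]; simp)
  have haltlen : (transform_alt g).length = tfR g := by
    unfold transform_alt tfR
    simp [PySem.List.length_pyRange_one]
  have haltrow : ∀ (i : Nat) (h : i < (transform_alt g).length), (transform_alt g)[i].length = tfC g := by
    intro i h
    unfold transform_alt tfC
    simp [PySem.List.length_pyRange_one]
  rw [transform_eq_fold]
  unfold transform_alt
  apply List.ext_getElem (by rw [hlen]; simp [PySem.List.length_pyRange_one]; rfl)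
  intro i hi hi'
  have hiR : i < tfR g := by rwa [hlen] at hi
  rw [List.getElem_map, PySem.List.getElem_pyRange_one]
  apply List.ext_getElem (by rw [hrowlen _ (List.getElem_mem hi)]; simp [PySem.List.length_pyRange_one]; rfl)
  intro j hj hj'
  have hjC : j < tfC g := by rwa [hrowlen _ (List.getElem_mem hi)] at hj
  rw [List.getElem_map, PySem.List.getElem_pyRange_one]
  simp only [zero_add]
  rw [← getD_eq_getElem' _ j 0 hj, ← getD_eq_getElem' _ i [] hi]
  have hcoe : ((((quadList g).foldl (stepQ g)
      (List.replicate (tfR g) (List.replicate (tfC g) (6 : Int)))).getD i []).getD j 0) =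
      cellOf ((quadList g).foldl (stepQ g)
      (List.replicate (tfR g) (List.replicate (tfC g) (6 : Int)))) i j := rfl
  rw [hcoe]
  by_cases hcond : tfN g - tfWidth g (PySem.Int.floordiv (i : Int) (tfRows g))
      ≤ PySem.Int.floordiv (j : Int) (tfCols g)
  · rw [(hcell i j hiR hjC).1 ((exists_land_iff g hNg hrows hW i j hiR hjC).mpr hcond),
      if_pos hcond]
    rfl
  · have hnone : ∀ q ∈ quadList g, ¬(landRow g q = (i : Int) ∧ landCol g q = (j : Int)) := by
      intro q hq hland
      exact hcond ((exists_land_iff g hNg hrows hW i j hiR hjC).mp ⟨q, hq, hland⟩)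
    rw [(hcell i j hiR hjC).2 hnone, if_neg hcond]
    unfold cellOf
    rw [List.getD_replicate _ hiR, List.getD_replicate _ hjC]
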